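-- pv_equiv track=rewrite | github.com/wongzc/NUS_IT5001_PE_answer | IT5001 2023_24 SEM1 PE.py | black_area
-- ===== SOURCE A (Python) =====
-- def black_area(r,c,s):
--     col=[0,0]
--
--     for cc in range(c):
--         col[cc//s%2]+=1
--     ans=0
--     for rr in range(r):
--         for cc,c in enumerate(col):
--             divR=rr//s%2
--             divC=cc%2
--             if divC==divR:
--                 ans+=c
--     return ans
-- ===== SOURCE B (Python) =====
-- def black_area(r, c, s):
--     # closed-form: count rows/columns whose block index is even, multiply per parity
--     def even_blocks(n):
--         # number of k in [0, n) with (k // s) even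
--         n = max(n, 0)
--         q, rem = divmod(n, 2 * s)
--         return q * s + min(rem, s)
--     r0 = even_blocks(r)
--     c0 = even_blocks(c)
--     return r0 * c0 + (max(r, 0) - r0) * (max(c, 0) - c0)
-- ===== Notes on version B (the rewrite author's own statement) =====
-- stated objective: faster
-- what changed: Replaces the O(c) column-counting loop and the O(r) row loop by a closed-form divmod count of even-parity blocks per axis, combined by one multiplication per parity.
-- outside the precondition, e.g. on black_area(9, 28, -1): A returns 126, B returns 127; on black_area(2, 3, 0): A raises ZeroDivisionError, B raises ZeroDivisionError
import Mathlib
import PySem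

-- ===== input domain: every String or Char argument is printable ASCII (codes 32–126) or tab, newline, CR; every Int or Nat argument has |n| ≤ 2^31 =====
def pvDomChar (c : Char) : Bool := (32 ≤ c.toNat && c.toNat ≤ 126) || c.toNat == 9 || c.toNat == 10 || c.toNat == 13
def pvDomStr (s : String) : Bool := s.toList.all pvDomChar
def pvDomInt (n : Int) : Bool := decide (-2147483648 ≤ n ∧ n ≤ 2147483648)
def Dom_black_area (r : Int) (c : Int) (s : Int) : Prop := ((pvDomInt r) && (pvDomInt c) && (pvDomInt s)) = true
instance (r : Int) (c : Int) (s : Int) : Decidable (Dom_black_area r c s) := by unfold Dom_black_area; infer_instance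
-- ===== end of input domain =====

-- B replaces both linear loops by a closed-form divmod count per axis (asymptotically faster).

-- ===== PORT A =====
def black_area (r : Int) (c : Int) (s : Int) : Int :=
  let col : Int × Int :=
    (PySem.List.pyRange 0 c 1).foldl
      (fun col cc =>
        if PySem.Int.mod (PySem.Int.floordiv cc s) 2 = 0 then (col.1 + 1, col.2)
        else (col.1, col.2 + 1))
      (0, 0)
  (PySem.List.pyRange 0 r 1).foldl
    (fun ans rr =>
      (PySem.List.enumerate [col.1, col.2] 0).foldl
        (fun ans p =>
          let divR := PySem.Int.mod (PySem.Int.floordiv rr s) 2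
          let divC := PySem.Int.mod p.1 2
          if divC = divR then ans + p.2 else ans)
        ans)
    0

-- ===== PORT B =====
-- number of k in [0, n) with (k // s) even, in closed form (Source B's even_blocks)
def evenBlocks (s : Int) (n : Int) : Int :=
  let n' := max n 0
  let q := PySem.Int.floordiv n' (2 * s)
  let rem := PySem.Int.mod n' (2 * s)
  q * s + min rem s

def black_area_alt (r : Int) (c : Int) (s : Int) : Int :=
  let r0 := evenBlocks s r
  let c0 := evenBlocks s c
  r0 * c0 + (max r 0 - r0) * (max c 0 - c0)

-- ===== PRECONDITION & SPEC =====
-- Pre_ restricts to positive block size s, the task's natural domain: A raises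
-- ZeroDivisionError for s = 0 (when r > 0 or c > 0), and for s < 0 A's value comes from
-- negative floor division, meaningless for a block size; B's closed form is not made to mimic it.
def Pre_black_area (r : Int) (c : Int) (s : Int) : Prop := 0 < s
instance (r : Int) (c : Int) (s : Int) : Decidable (Pre_black_area r c s) := by unfold Pre_black_area; infer_instance
def pvWitness_black_area : Int × Int × Int := (4, 5, 2)
def Spec_black_area (r : Int) (c : Int) (s : Int) (out : Int) : Prop := out = black_area_alt r c s
instance (r : Int) (c : Int) (s : Int) (out : Int) : Decidable (Spec_black_area r c s out) := by unfold Spec_black_area; infer_instance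

-- ===== CLAIM (what is proved, stated in full; the proofs are below) =====
def Claim_equal_black_area : Prop := ∀ (r : Int) (c : Int) (s : Int), Dom_black_area r c s → Pre_black_area r c s → Spec_black_area r c s (black_area r c s)

-- ===== LEMMAS AND PROOFS =====

-- A's column-loop body and row-loop body, named so the folds can be reasoned about
def colF (s : Int) : Int × Int → Int → Int × Int := fun col cc =>
  if PySem.Int.mod (PySem.Int.floordiv cc s) 2 = 0 then (col.1 + 1, col.2)
  else (col.1, col.2 + 1)

def rowF (s : Int) (col : Int × Int) : Int → Int → Int := fun ans rr =>
  (PySem.List.enumerate [col.1, col.2] 0).foldl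
    (fun ans p =>
      let divR := PySem.Int.mod (PySem.Int.floordiv rr s) 2
      let divC := PySem.Int.mod p.1 2
      if divC = divR then ans + p.2 else ans)
    ans

lemma black_area_eq (r c s : Int) :
    black_area r c s =
      (PySem.List.pyRange 0 r 1).foldl
        (rowF s ((PySem.List.pyRange 0 c 1).foldl (colF s) (0, 0))) 0 := rfl

lemma black_area_alt_eq (r c s : Int) :
    black_area_alt r c s =
      evenBlocks s r * evenBlocks s c +
        (max r 0 - evenBlocks s r) * (max c 0 - evenBlocks s c) := rfl

lemma parity_iff (s n : Int) (hs : 0 < s) :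
    ((n / s) % 2 = 0) ↔ n % (2 * s) < s := by
  have h2s : 0 < 2 * s := by omega
  set q := n / (2 * s) with hq
  set rem := n % (2 * s) with hrem
  have hr0 : 0 ≤ rem := Int.emod_nonneg n (by omega)
  have hr1 : rem < 2 * s := Int.emod_lt_of_pos n h2s
  have hn' : n = rem + 2 * q * s := by
    have h := Int.emod_add_ediv n (2 * s)
    rw [← hrem, ← hq] at h
    linarith
  have hdiv : n / s = rem / s + 2 * q := by
    conv_lhs => rw [hn']
    exact Int.add_mul_ediv_right rem (2 * q) (by omega)
  by_cases hlt : rem < s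
  · have h0 : rem / s = 0 := Int.ediv_eq_zero_of_lt hr0 hlt
    rw [hdiv, h0]
    omega
  · have h1 : rem / s = 1 := by
      have e : rem = (rem - s) + 1 * s := by ring
      have hz : (rem - s) / s = 0 := Int.ediv_eq_zero_of_lt (by omega) (by omega)
      calc rem / s = ((rem - s) + 1 * s) / s := by rw [← e]
        _ = (rem - s) / s + 1 := Int.add_mul_ediv_right _ _ (by omega)
        _ = 1 := by rw [hz]; omega
    rw [hdiv, h1]
    omega

lemma eb_nonneg_eq (s n : Int) (hs : 0 < s) (hn : 0 ≤ n) :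
    evenBlocks s n = (n / (2 * s)) * s + min (n % (2 * s)) s := by
  have h2s : 0 < 2 * s := by omega
  have hmax : max n 0 = n := by omega
  simp only [evenBlocks, hmax, PySem.Int.floordiv_eq_ediv_of_pos h2s,
    PySem.Int.mod_eq_emod_of_pos h2s]

lemma eb_nonpos (s n : Int) (hs : 0 < s) (hn : n ≤ 0) : evenBlocks s n = 0 := by
  have h2s : 0 < 2 * s := by omega
  have hmax : max n 0 = 0 := by omega
  simp only [evenBlocks, hmax, PySem.Int.floordiv_eq_ediv_of_pos h2s,
    PySem.Int.mod_eq_emod_of_pos h2s, Int.zero_ediv, Int.zero_emod, zero_mul, zero_add]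
  omega

lemma eb_step (s n : Int) (hs : 0 < s) (hn : 0 ≤ n) :
    evenBlocks s (n + 1) =
      evenBlocks s n + (if PySem.Int.mod (PySem.Int.floordiv n s) 2 = 0 then 1 else 0) := by
  have h2s : 0 < 2 * s := by omega
  rw [eb_nonneg_eq s n hs hn, eb_nonneg_eq s (n + 1) hs (by omega),
    PySem.Int.floordiv_eq_ediv_of_pos hs, PySem.Int.mod_eq_emod_of_pos (by norm_num : (0:Int) < 2)]
  set q := n / (2 * s) with hq
  set rem := n % (2 * s) with hrem
  have hr0 : 0 ≤ rem := Int.emod_nonneg n (by omega)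
  have hr1 : rem < 2 * s := Int.emod_lt_of_pos n h2s
  have hn' : n = rem + q * (2 * s) := by
    have h := Int.emod_add_ediv n (2 * s)
    rw [← hrem, ← hq] at h
    linarith
  have hcond : ((n / s) % 2 = 0) ↔ rem < s := parity_iff s n hs
  rw [if_congr hcond rfl rfl]
  by_cases hc : rem + 1 < 2 * s
  · have e : n + 1 = (rem + 1) + q * (2 * s) := by omega
    have hdiv : (n + 1) / (2 * s) = q := by
      rw [e, Int.add_mul_ediv_right _ _ (by omega),
        Int.ediv_eq_zero_of_lt (by omega) hc, zero_add]
    have hmod : (n + 1) % (2 * s) = rem + 1 := by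
      rw [Int.emod_def, hdiv]
      linear_combination hn'
    rw [hdiv, hmod]
    split_ifs <;> omega
  · have hr2 : rem + 1 = 2 * s := by omega
    have e : n + 1 = (q + 1) * (2 * s) := by linear_combination hn' + hr2
    have hdiv : (n + 1) / (2 * s) = q + 1 := by
      rw [e, Int.mul_ediv_cancel _ (by omega)]
    have hmod : (n + 1) % (2 * s) = 0 := by
      rw [Int.emod_def, hdiv]
      linear_combination hn' + hr2
    have hmin0 : min (0 : Int) s = 0 := by omega
    have hminr : min rem s = s := by omega
    rw [hdiv, hmod, hmin0, hminr, if_neg (by omega)]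
    ring

lemma colfold (s : Int) (hs : 0 < s) (n : Nat) :
    (PySem.List.pyRange 0 (n : Int) 1).foldl (colF s) (0, 0) =
      (evenBlocks s n, (n : Int) - evenBlocks s n) := by
  induction n with
  | zero =>
    rw [show ((0 : Nat) : Int) = 0 by norm_num, PySem.List.pyRange_one_eq_nil (le_refl 0)]
    simp [eb_nonpos s 0 hs (le_refl 0)]
  | succ k ih =>
    have h1 : ((k + 1 : Nat) : Int) = (k : Int) + 1 := by push_cast; ring
    rw [h1, PySem.List.pyRange_one_succ_right (by positivity), List.foldl_append, ih,
      List.foldl_cons, List.foldl_nil, eb_step s k hs (by positivity)]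
    unfold colF
    split_ifs <;> simp [Prod.ext_iff] <;> ring

lemma inner_eval (s a b ans rr : Int) (hs : 0 < s) :
    rowF s (a, b) ans rr = ans + (if (rr / s) % 2 = 0 then a else b) := by
  unfold rowF
  have hm0 : PySem.Int.mod (0 : Int) 2 = 0 := by decide
  have hd : PySem.Int.mod (PySem.Int.floordiv rr s) 2 = (rr / s) % 2 := by
    rw [PySem.Int.floordiv_eq_ediv_of_pos hs,
      PySem.Int.mod_eq_emod_of_pos (by norm_num : (0:Int) < 2)]
  simp only [PySem.List.enumerate, List.foldl_cons, List.foldl_nil, hm0, hd]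
  have hpar : (rr / s) % 2 = 0 ∨ (rr / s) % 2 = 1 := by omega
  rcases hpar with h | h <;> simp [h]

lemma rowfold (s a b : Int) (hs : 0 < s) (n : Nat) :
    (PySem.List.pyRange 0 (n : Int) 1).foldl (rowF s (a, b)) 0 =
      evenBlocks s n * a + ((n : Int) - evenBlocks s n) * b := by
  induction n with
  | zero =>
    rw [show ((0 : Nat) : Int) = 0 by norm_num, PySem.List.pyRange_one_eq_nil (le_refl 0)]
    simp [eb_nonpos s 0 hs (le_refl 0)]
  | succ k ih =>
    have h1 : ((k + 1 : Nat) : Int) = (k : Int) + 1 := by push_cast; ring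
    rw [h1, PySem.List.pyRange_one_succ_right (by positivity), List.foldl_append, ih,
      List.foldl_cons, List.foldl_nil, inner_eval s a b _ _ hs,
      eb_step s k hs (by positivity), PySem.Int.floordiv_eq_ediv_of_pos hs,
      PySem.Int.mod_eq_emod_of_pos (by norm_num : (0:Int) < 2)]
    split_ifs <;> ring

lemma pyRange_toNat (m : Int) :
    PySem.List.pyRange 0 m 1 = PySem.List.pyRange 0 ((m.toNat : Int)) 1 := by
  by_cases h : m ≤ 0
  · rw [PySem.List.pyRange_one_eq_nil h, PySem.List.pyRange_one_eq_nil (by omega)]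
  · rw [Int.toNat_of_nonneg (by omega)]

lemma eb_toNat (s m : Int) : evenBlocks s m = evenBlocks s ((m.toNat : Int)) := by
  have h : max m 0 = max ((m.toNat : Int)) 0 := by omega
  simp only [evenBlocks, h]

-- ===== VERDICT (by name: the statement is the Claim_ definition above) =====
theorem black_area_spec : Claim_equal_black_area := by
  intro r c s _ hs
  unfold Spec_black_area
  rw [black_area_eq, black_area_alt_eq, pyRange_toNat c, pyRange_toNat r,
    colfold s hs c.toNat, rowfold s _ _ hs r.toNat,
    ← eb_toNat s c, ← eb_toNat s r]
  have hc : ((c.toNat : Int)) = max c 0 := by omega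
  have hr : ((r.toNat : Int)) = max r 0 := by omega
  rw [hc, hr]
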